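-- pv_equiv track=rewrite | github.com/MorningBirds1003/NeuroSolver | Scripts/NeuroSolver/propagation/myelin_geometry.py | _build_label_sequence
-- ===== SOURCE A (Python) =====
-- from typing import Dict, List, Optional
--
-- def _build_label_sequence(node_count: int, internode_subsegments: int) -> List[str]:
--     """
--     Build the node/internode label sequence.
--
--     Example:
--     [node, internode, internode, node, internode, internode, node]
--     """
--     if node_count < 1:
--         raise ValueError("node_count must be >= 1.")
--     if internode_subsegments < 1:
--         raise ValueError("internode_subsegments must be >= 1.")
--
--     labels: List[str] = []
--     for node_idx in range(node_count):
--         labels.append("node")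
--         if node_idx < node_count - 1:
--             labels.extend(["internode"] * internode_subsegments)
--     return labels
-- ===== SOURCE B (Python) =====
-- from typing import List
--
-- def _build_label_sequence(node_count: int, internode_subsegments: int) -> List[str]:
--     if node_count < 1:
--         raise ValueError("node_count must be >= 1.")
--     if internode_subsegments < 1:
--         raise ValueError("internode_subsegments must be >= 1.")
--     period = internode_subsegments + 1
--     total = node_count + (node_count - 1) * internode_subsegments
--     return ["node" if i % period == 0 else "internode" for i in range(total)]
-- ===== Notes on version B (the rewrite author's own statement) =====
-- stated objective: alternative
-- what changed: Instead of looping over nodes and appending blocks, B computes the total length and classifies each flat position arithmetically: index i is 'node' iff i mod (internode_subsegments+1) == 0.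
import Mathlib
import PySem

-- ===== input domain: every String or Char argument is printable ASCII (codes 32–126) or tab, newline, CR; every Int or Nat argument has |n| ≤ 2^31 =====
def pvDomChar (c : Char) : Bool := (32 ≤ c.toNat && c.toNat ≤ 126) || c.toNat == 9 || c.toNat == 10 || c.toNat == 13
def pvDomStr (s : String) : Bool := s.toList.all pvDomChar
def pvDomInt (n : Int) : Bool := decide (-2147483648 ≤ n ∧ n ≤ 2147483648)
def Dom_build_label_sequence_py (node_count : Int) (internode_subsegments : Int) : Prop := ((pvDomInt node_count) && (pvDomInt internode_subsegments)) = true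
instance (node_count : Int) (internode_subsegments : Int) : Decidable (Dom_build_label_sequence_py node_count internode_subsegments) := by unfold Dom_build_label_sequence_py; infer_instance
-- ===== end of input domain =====

-- B classifies each flat index by modular arithmetic (i mod (k+1)) instead of appending per-node blocks (alternative algorithm, same cost).


-- ===== PORT A =====
-- loop: for node_idx in range(node_count): append "node"; if node_idx < node_count-1 extend internodes
def build_label_sequence_py (node_count : Int) (internode_subsegments : Int) : List String :=
  (PySem.List.pyRange 0 node_count 1).foldl
    (fun labels node_idx =>
      (labels ++ ["node"]) ++
        (if node_idx < node_count - 1 then List.replicate internode_subsegments.toNat "internode" else []))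
    []

-- ===== PORT B =====
-- comprehension over range(total): label by i % period == 0
def build_label_sequence_py_alt (node_count : Int) (internode_subsegments : Int) : List String :=
  let period := internode_subsegments + 1
  let total := node_count + (node_count - 1) * internode_subsegments
  (PySem.List.pyRange 0 total 1).map
    (fun i => if PySem.Int.mod i period = 0 then "node" else "internode")

-- ===== PRECONDITION & SPEC =====
-- Pre_ excludes exactly the inputs where A raises ValueError (B raises there too).
def Pre_build_label_sequence_py (node_count : Int) (internode_subsegments : Int) : Prop :=
  1 ≤ node_count ∧ 1 ≤ internode_subsegments
instance (node_count : Int) (internode_subsegments : Int) : Decidable (Pre_build_label_sequence_py node_count internode_subsegments) := by unfold Pre_build_label_sequence_py; infer_instance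
def pvWitness_build_label_sequence_py : Int × Int := (3, 2)

def Spec_build_label_sequence_py (node_count : Int) (internode_subsegments : Int) (out : List String) : Prop := out = build_label_sequence_py_alt node_count internode_subsegments
instance (node_count : Int) (internode_subsegments : Int) (out : List String) : Decidable (Spec_build_label_sequence_py node_count internode_subsegments out) := by unfold Spec_build_label_sequence_py; infer_instance

-- ===== CLAIM =====
def Claim_equal_build_label_sequence_py : Prop := ∀ (node_count : Int) (internode_subsegments : Int), Dom_build_label_sequence_py node_count internode_subsegments → Pre_build_label_sequence_py node_count internode_subsegments → Spec_build_label_sequence_py node_count internode_subsegments (build_label_sequence_py node_count internode_subsegments)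

-- ===== LEMMAS AND PROOFS =====

-- A's loop over range 0..m-1, with every index < c, builds m blocks.
lemma blseq_loop (c : Int) (k : Nat) (m : Nat) (hm : (m : Int) ≤ c) :
    (PySem.List.pyRange 0 (m : Int) 1).foldl
      (fun labels node_idx =>
        (labels ++ ["node"]) ++
          (if node_idx < c then List.replicate k "internode" else []))
      [] =
    (List.replicate m ("node" :: List.replicate k "internode")).flatten := by
  induction m with
  | zero => simp [PySem.List.pyRange_one_eq_nil]
  | succ m ih =>
    rw [show ((m + 1 : Nat) : Int) = (m : Int) + 1 by push_cast; ring]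
    rw [PySem.List.pyRange_one_succ_right (by positivity), List.foldl_append]
    have hm' : (m : Int) ≤ c := by push_cast at hm; omega
    rw [ih hm']
    have hcond : (m : Int) < c := by push_cast at hm; omega
    simp [hcond, List.replicate_succ']

-- A equals the block closed form.
lemma a_closed (n k : Int) (h1 : 1 ≤ n) :
    build_label_sequence_py n k =
    (List.replicate (n - 1).toNat ("node" :: List.replicate k.toNat "internode")).flatten
      ++ ["node"] := by
  unfold build_label_sequence_py
  have hsplit : n = ((n - 1).toNat : Int) + 1 := by omega
  rw [hsplit, PySem.List.pyRange_one_succ_right (by positivity), List.foldl_append]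
  rw [show (((n-1).toNat : Int) + 1 - 1) = ((n-1).toNat : Int) by ring]
  rw [blseq_loop ((n-1).toNat : Int) k.toNat (n-1).toNat le_rfl]
  simp

-- B's per-index map over m whole periods yields m blocks.
lemma b_blocks (p : Int) (hp : 2 ≤ p) (m : Nat) :
    (PySem.List.pyRange 0 ((m : Int) * p) 1).map
      (fun i => if PySem.Int.mod i p = 0 then "node" else "internode") =
    (List.replicate m ("node" :: List.replicate (p - 1).toNat "internode")).flatten := by
  induction m with
  | zero => simp [PySem.List.pyRange_one_eq_nil]
  | succ m ih =>
    have ha : (0 : Int) ≤ (m : Int) * p := by positivity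
    have hb : (m : Int) * p ≤ ((m + 1 : Nat) : Int) * p := by push_cast; nlinarith
    rw [PySem.List.pyRange_one_append 0 ((m : Int) * p) (((m + 1 : Nat) : Int) * p) ha hb,
        List.map_append, ih]
    have hseg : (PySem.List.pyRange ((m : Int) * p) (((m + 1 : Nat) : Int) * p) 1).map
        (fun i => if PySem.Int.mod i p = 0 then "node" else "internode") =
        "node" :: List.replicate (p - 1).toNat "internode" := by
      have hlt : (m : Int) * p < ((m + 1 : Nat) : Int) * p := by push_cast; nlinarith
      rw [PySem.List.pyRange_one_cons hlt, List.map_cons]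
      have h0 : PySem.Int.mod ((m : Int) * p) p = 0 := by
        rw [PySem.Int.mod_eq_zero_iff_dvd]; exact ⟨(m : Int), mul_comm _ _⟩
      rw [h0]
      simp only [reduceIte]
      congr 1
      -- remaining indices are not multiples of p
      have hc : ∀ i ∈ PySem.List.pyRange ((m : Int) * p + 1) (((m + 1 : Nat) : Int) * p) 1,
          (fun i => if PySem.Int.mod i p = 0 then "node" else "internode") i = "internode" := by
        intro i hi
        rw [PySem.List.mem_pyRange_one] at hi
        have : PySem.Int.mod i p ≠ 0 := by
          simp only [Ne, PySem.Int.mod_eq_zero_iff_dvd]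
          rintro ⟨c, rfl⟩
          obtain ⟨hi1, hi2⟩ := hi
          push_cast at hi2
          have hppos : (0 : Int) ≤ p := by omega
          have h1 : (m : Int) * p < c * p := by rw [mul_comm c p]; linarith
          have h2 : c * p < ((m : Int) + 1) * p := by rw [mul_comm c p]; linarith
          have hmc : (m : Int) < c := lt_of_mul_lt_mul_right h1 hppos
          have hcm : c < (m : Int) + 1 := lt_of_mul_lt_mul_right h2 hppos
          omega
        simp [this]
      rw [List.map_congr_left hc, List.map_const', PySem.List.length_pyRange_one]
      congr 2
      push_cast
      ring
    rw [hseg, List.replicate_succ']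
    simp
  
theorem pv_main (n k : Int) (h1 : 1 ≤ n) (h2 : 1 ≤ k) :
    build_label_sequence_py n k = build_label_sequence_py_alt n k := by
  rw [a_closed n k h1]
  unfold build_label_sequence_py_alt
  simp only []
  have hp : 2 ≤ k + 1 := by omega
  have htot : n + (n - 1) * k = ((n - 1).toNat : Int) * (k + 1) + 1 := by
    have : ((n - 1).toNat : Int) = n - 1 := by omega
    rw [this]; ring
  rw [htot, PySem.List.pyRange_one_succ_right (by positivity), List.map_append,
      b_blocks (k + 1) hp (n - 1).toNat]
  have h0 : PySem.Int.mod (((n - 1).toNat : Int) * (k + 1)) (k + 1) = 0 := by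
    rw [PySem.Int.mod_eq_zero_iff_dvd]; exact ⟨((n - 1).toNat : Int), mul_comm _ _⟩
  have hk1 : ((k : Int) + 1 - 1).toNat = k.toNat := by omega
  rw [hk1, List.map_singleton, h0]
  simp

-- ===== VERDICT =====
theorem build_label_sequence_py_spec : Claim_equal_build_label_sequence_py := by
  intro nc is _ hpre
  unfold Spec_build_label_sequence_py
  exact pv_main nc is hpre.1 hpre.2
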